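-- pv_equiv track=rewrite | github.com/LeguLeteron/depreciated-middleware | kck.py | is_alphabet
-- ===== SOURCE A (Python) =====
-- alphabets = ('A', 'B', 'C', 'D', 'E', 'F', 'G', 'H', 'I', 'J', "K", 'L', 'M',
--              'N', 'O', 'P', 'Q', 'R', 'S', 'T', 'U', 'V', 'W', 'X', 'Y', 'Z')
--
-- def is_alphabet(char):
--     if char in alphabets:
--         return True
--     else:
--         for i in alphabets:
--             if i.lower() == char:
--                 return True
--     return False
-- ===== SOURCE B (Python) =====
-- def is_alphabet(char):
--     return isinstance(char, str) and len(char) == 1 and ('A' <= char <= 'Z' or 'a' <= char <= 'z')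
-- ===== Notes on version B (the rewrite author's own statement) =====
-- stated objective: simpler
-- what changed: Replaced the 26-tuple membership test plus lowercase scan with a closed-form ordinal range check on a single character (no loop, no tuple).
import Mathlib
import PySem

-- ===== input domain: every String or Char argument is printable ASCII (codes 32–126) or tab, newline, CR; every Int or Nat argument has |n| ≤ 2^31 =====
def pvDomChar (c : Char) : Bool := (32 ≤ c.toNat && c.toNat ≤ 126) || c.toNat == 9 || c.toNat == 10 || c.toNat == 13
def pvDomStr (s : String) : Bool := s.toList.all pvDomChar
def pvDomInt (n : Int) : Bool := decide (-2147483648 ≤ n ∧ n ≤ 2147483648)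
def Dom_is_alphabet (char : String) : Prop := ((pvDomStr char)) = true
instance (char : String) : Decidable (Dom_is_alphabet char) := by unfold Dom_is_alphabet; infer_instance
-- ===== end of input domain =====

-- B replaces A's 26-tuple membership test plus lowercase scan by a closed-form single-character range check (simpler, no loop).

-- ===== PORT A =====
def pvAlphabets : List String :=
  ["A", "B", "C", "D", "E", "F", "G", "H", "I", "J", "K", "L", "M",
   "N", "O", "P", "Q", "R", "S", "T", "U", "V", "W", "X", "Y", "Z"]

-- 'char in alphabets' → contains; the for-loop returning True on the first i with i.lower() == char → any
def is_alphabet (char : String) : Bool :=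
  if pvAlphabets.contains char then true
  else if pvAlphabets.any (fun i => PySem.Str.lower i == char) then true
  else false

-- ===== PORT B =====
-- len(char) == 1 becomes the single-character match; for a one-character string Python's
-- lexicographic comparisons 'A' <= char <= 'Z' are exactly the character comparisons (exact).
def is_alphabet_alt (char : String) : Bool :=
  match char.toList with
  | [c] => ('A' ≤ c && c ≤ 'Z') || ('a' ≤ c && c ≤ 'z')
  | _ => false

-- ===== PRECONDITION & SPEC =====
def Spec_is_alphabet (char : String) (out : Bool) : Prop := out = is_alphabet_alt char
instance (char : String) (out : Bool) : Decidable (Spec_is_alphabet char out) := by unfold Spec_is_alphabet; infer_instance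

-- ===== CLAIM (what is proved, stated in full; the proofs are below) =====
def Claim_equal_is_alphabet : Prop := ∀ (char : String), Dom_is_alphabet char → Spec_is_alphabet char (is_alphabet char)

-- ===== LEMMAS AND PROOFS =====
theorem is_alphabet_eq (char : String) : is_alphabet char = is_alphabet_alt char := by
  have hl : ∀ (t : String), (char == t) = (char.toList == t.toList) := fun t => by
    simp [String.toList_inj]
  have hr : ∀ (t : String), (t == char) = (t.toList == char.toList) := fun t => by
    simp [String.toList_inj]
  simp only [is_alphabet, is_alphabet_alt, pvAlphabets,
    List.contains_cons, List.contains_nil, List.any_cons, List.any_nil,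
    show PySem.Str.lower "A" = "a" from rfl, show PySem.Str.lower "B" = "b" from rfl, show PySem.Str.lower "C" = "c" from rfl, show PySem.Str.lower "D" = "d" from rfl, show PySem.Str.lower "E" = "e" from rfl, show PySem.Str.lower "F" = "f" from rfl, show PySem.Str.lower "G" = "g" from rfl, show PySem.Str.lower "H" = "h" from rfl, show PySem.Str.lower "I" = "i" from rfl, show PySem.Str.lower "J" = "j" from rfl, show PySem.Str.lower "K" = "k" from rfl, show PySem.Str.lower "L" = "l" from rfl, show PySem.Str.lower "M" = "m" from rfl, show PySem.Str.lower "N" = "n" from rfl, show PySem.Str.lower "O" = "o" from rfl, show PySem.Str.lower "P" = "p" from rfl, show PySem.Str.lower "Q" = "q" from rfl, show PySem.Str.lower "R" = "r" from rfl, show PySem.Str.lower "S" = "s" from rfl, show PySem.Str.lower "T" = "t" from rfl, show PySem.Str.lower "U" = "u" from rfl, show PySem.Str.lower "V" = "v" from rfl, show PySem.Str.lower "W" = "w" from rfl, show PySem.Str.lower "X" = "x" from rfl, show PySem.Str.lower "Y" = "y" from rfl, show PySem.Str.lower "Z" = "z" from rfl,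
    hl, hr, show "A".toList = ['A'] from rfl, show "B".toList = ['B'] from rfl, show "C".toList = ['C'] from rfl, show "D".toList = ['D'] from rfl, show "E".toList = ['E'] from rfl, show "F".toList = ['F'] from rfl, show "G".toList = ['G'] from rfl, show "H".toList = ['H'] from rfl, show "I".toList = ['I'] from rfl, show "J".toList = ['J'] from rfl, show "K".toList = ['K'] from rfl, show "L".toList = ['L'] from rfl, show "M".toList = ['M'] from rfl, show "N".toList = ['N'] from rfl, show "O".toList = ['O'] from rfl, show "P".toList = ['P'] from rfl, show "Q".toList = ['Q'] from rfl, show "R".toList = ['R'] from rfl, show "S".toList = ['S'] from rfl, show "T".toList = ['T'] from rfl, show "U".toList = ['U'] from rfl, show "V".toList = ['V'] from rfl, show "W".toList = ['W'] from rfl, show "X".toList = ['X'] from rfl, show "Y".toList = ['Y'] from rfl, show "Z".toList = ['Z'] from rfl, show "a".toList = ['a'] from rfl, show "b".toList = ['b'] from rfl, show "c".toList = ['c'] from rfl, show "d".toList = ['d'] from rfl, show "e".toList = ['e'] from rfl, show "f".toList = ['f'] from rfl, show "g".toList = ['g'] from rfl, show "h".toList = ['h'] from rfl, show "i".toList = ['i']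 from rfl, show "j".toList = ['j'] from rfl, show "k".toList = ['k'] from rfl, show "l".toList = ['l'] from rfl, show "m".toList = ['m'] from rfl, show "n".toList = ['n'] from rfl, show "o".toList = ['o'] from rfl, show "p".toList = ['p'] from rfl, show "q".toList = ['q'] from rfl, show "r".toList = ['r'] from rfl, show "s".toList = ['s'] from rfl, show "t".toList = ['t'] from rfl, show "u".toList = ['u'] from rfl, show "v".toList = ['v'] from rfl, show "w".toList = ['w'] from rfl, show "x".toList = ['x'] from rfl, show "y".toList = ['y'] from rfl, show "z".toList = ['z'] from rfl]
  rcases h : char.toList with _ | ⟨c, _ | ⟨d, t⟩⟩ <;> simp only [h]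
  · decide
  · rw [Bool.eq_iff_iff]
    simp only [Bool.if_true_left, Bool.or_eq_true, Bool.and_eq_true, decide_eq_true_eq,
      beq_iff_eq, List.cons.injEq, and_true, Bool.false_eq_true, or_false,
      Char.ext_iff, Char.le_def, UInt32.le_iff_toNat_le, UInt32.ext_iff,
      show 'A'.val.toNat = 65 from rfl, show 'B'.val.toNat = 66 from rfl, show 'C'.val.toNat = 67 from rfl, show 'D'.val.toNat = 68 from rfl, show 'E'.val.toNat = 69 from rfl, show 'F'.val.toNat = 70 from rfl, show 'G'.val.toNat = 71 from rfl, show 'H'.val.toNat = 72 from rfl, show 'I'.val.toNat = 73 from rfl, show 'J'.val.toNat = 74 from rfl, show 'K'.val.toNat = 75 from rfl, show 'L'.val.toNat = 76 from rfl, show 'M'.val.toNat = 77 from rfl, show 'N'.val.toNat = 78 from rfl, show 'O'.val.toNat = 79 from rfl, show 'P'.val.toNat = 80 from rfl, show 'Q'.val.toNat = 81 from rfl, show 'R'.val.toNat = 82 from rfl, show 'S'.val.toNat = 83 from rfl, show 'T'.val.toNat = 84 from rfl, show 'U'.val.toNat = 85 from rfl, show 'V'.val.toNat = 86 from rfl,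 show 'W'.val.toNat = 87 from rfl, show 'X'.val.toNat = 88 from rfl, show 'Y'.val.toNat = 89 from rfl, show 'Z'.val.toNat = 90 from rfl, show 'a'.val.toNat = 97 from rfl, show 'b'.val.toNat = 98 from rfl, show 'c'.val.toNat = 99 from rfl, show 'd'.val.toNat = 100 from rfl, show 'e'.val.toNat = 101 from rfl, show 'f'.val.toNat = 102 from rfl, show 'g'.val.toNat = 103 from rfl, show 'h'.val.toNat = 104 from rfl, show 'i'.val.toNat = 105 from rfl, show 'j'.val.toNat = 106 from rfl, show 'k'.val.toNat = 107 from rfl, show 'l'.val.toNat = 108 from rfl, show 'm'.val.toNat = 109 from rfl, show 'n'.val.toNat = 110 from rfl, show 'o'.val.toNat = 111 from rfl, show 'p'.val.toNat = 112 from rfl, show 'q'.val.toNat = 113 from rfl, show 'r'.val.toNat = 114 from rfl, show 's'.val.toNat = 115 from rfl, show 't'.val.toNat = 116 from rfl, show 'u'.val.toNat = 117 from rfl, show 'v'.val.toNat = 118 from rfl, show 'w'.val.toNat = 119 from rfl, show 'x'.val.toNat = 120 from rfl, show 'y'.val.toNat = 121 from rfl, show 'z'.val.toNat = 122 from rfl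]
    omega
  · simp

-- ===== VERDICT (by name: the statement is the Claim_ definition above) =====
theorem is_alphabet_spec : Claim_equal_is_alphabet := by
  intro char _
  exact is_alphabet_eq char
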